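-- pv_equiv track=rewrite | github.com/morganstanley-cs480-fyp/cs480fyp | services/rag-service/app/services/narrative_formatter.py | categorize_exception
-- ===== SOURCE A (Python) =====
-- def categorize_exception(error_msg: str, comment: str = "") -> str:
--     """
--     Map error messages to problem categories for semantic clustering.
--
--     Args:
--         error_msg: The exception message text to categorize
--         comment: Additional comment or context about the exception
--
--     Returns:
--         Pipe-separated string of matching categories
--         Returns "General Exception" if no specific category matches
--     """
--     combined_text = f"{error_msg} {comment}".lower()
--     categories = []
--
--     # Categorize based on keywords in exception message and comment
--     category_keywords = {
--         "Settlement Instructions Problem": [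
--             'ssi', 'settlement instruction', 'payment routing', 'correspondent bank',
--             'intermediary bank', 'settlement bank', 'nostro', 'vostro', 'settlement'
--         ],
--         "Collateral and Margin Issue": [
--             'collateral', 'margin', 'csa', 'variation margin', 'initial margin',
--             'margin call', 'vm', 'im', 'posting requirement', 'insufficient margin'
--         ],
--         "Legal Documentation Gap": [
--             'isda', 'lei', 'legal entity identifier', 'documentation', 'master agreement',
--             'confirmation', 'legal documentation', 'legal terms', 'credit support annex',
--             'mapping', 'no mapping'
--         ],
--         "Credit Capacity Constraint": [
--             'credit limit', 'credit line', 'downgrade', 'credit rating', 'exposure',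
--             'credit capacity', 'creditworthiness', 'credit check', 'credit reject',
--             'credit fail', 'credit approved'
--         ],
--         "Holiday Calendar Conflict": [
--             'holiday', 'bank holiday', 'closed market', 'non-business day',
--             'market closure', 'calendar', 'settlement date'
--         ],
--         "Rate and Pricing Validation": [
--             'libor', 'sofr', 'off-market', 'rate', 'fixing', 'benchmark',
--             'pricing', 'market rate', 'reference rate'
--         ],
--         "Reference Entity Credit Event": [
--             'succession', 'restructuring', 'credit event', 'isda determinations committee',
--             'reference entity', 'merger', 'spin-off', 'isda dc'
--         ],
--         "Regulatory Compliance Failure": [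
--             'mifid', 'aml', 'kyc', 'ofac', 'sanctions', 'compliance', 'regulatory',
--             'emir', 'dodd-frank', 'screening'
--         ],
--         "System and Infrastructure Failure": [
--             'swift', 'connectivity', 'timeout', 'system', 'booking system',
--             'outage', 'infrastructure', 'technical failure', 'network', 'system error'
--         ],
--         "Trade Structure Non-Standard": [
--             'maturity', 'notional', 'imm date', 'tenor', 'effective date',
--             'trade structure', 'non-standard', 'trade economics'
--         ],
--         "Trade Lifecycle Workflow Issue": [
--             'affirmation', 'dtcc', 'compression', 'bilateral', 'novation',
--             'lifecycle', 'workflow', 'trade confirmation', 'consent', 'consent rejected'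
--         ],
--         "Capital Controls and Restrictions": [
--             'safe quota', 'capital control', 'cross-border', 'foreign exchange control',
--             'pboc', 'onshore', 'offshore', 'rmb restriction'
--         ],
--         "Settlement Netting Optimization": [
--             'netting', 'gross settlement', 'net settlement', 'bilateral netting',
--             'multilateral netting', 'settlement optimization'
--         ]
--     }
--
--     # Check each category
--     for category, keywords in category_keywords.items():
--         if any(kw in combined_text for kw in keywords):
--             categories.append(category)
--
--     # Return categories or default
--     return ' | '.join(categories) if categories else "General Exception"
-- ===== SOURCE B (Python) =====
-- """Single left-to-right scan over the text: a first-character index built once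
-- from a flat (category-id, keyword) table maps each character to the keywords that
-- can start there; matched category ids are collected in a set and projected onto
-- the numbered category list."""
--
-- # Numbered categories, in display order.
-- _CATEGORIES = [
--     (0, 'Settlement Instructions Problem'),
--     (1, 'Collateral and Margin Issue'),
--     (2, 'Legal Documentation Gap'),
--     (3, 'Credit Capacity Constraint'),
--     (4, 'Holiday Calendar Conflict'),
--     (5, 'Rate and Pricing Validation'),
--     (6, 'Reference Entity Credit Event'),
--     (7, 'Regulatory Compliance Failure'),
--     (8, 'System and Infrastructure Failure'),
--     (9, 'Trade Structure Non-Standard'),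
--     (10, 'Trade Lifecycle Workflow Issue'),
--     (11, 'Capital Controls and Restrictions'),
--     (12, 'Settlement Netting Optimization'),
-- ]
--
-- # Flat (category-id, keyword) table, sorted by keyword.
-- _PAIRS = [
--     (10, 'affirmation'),
--     (7, 'aml'),
--     (4, 'bank holiday'),
--     (5, 'benchmark'),
--     (10, 'bilateral'),
--     (12, 'bilateral netting'),
--     (8, 'booking system'),
--     (4, 'calendar'),
--     (11, 'capital control'),
--     (4, 'closed market'),
--     (1, 'collateral'),
--     (7, 'compliance'),
--     (10, 'compression'),
--     (2, 'confirmation'),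
--     (8, 'connectivity'),
--     (10, 'consent'),
--     (10, 'consent rejected'),
--     (0, 'correspondent bank'),
--     (3, 'credit approved'),
--     (3, 'credit capacity'),
--     (3, 'credit check'),
--     (6, 'credit event'),
--     (3, 'credit fail'),
--     (3, 'credit limit'),
--     (3, 'credit line'),
--     (3, 'credit rating'),
--     (3, 'credit reject'),
--     (2, 'credit support annex'),
--     (3, 'creditworthiness'),
--     (11, 'cross-border'),
--     (1, 'csa'),
--     (2, 'documentation'),
--     (7, 'dodd-frank'),
--     (3, 'downgrade'),
--     (10, 'dtcc'),
--     (9, 'effective date'),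
--     (7, 'emir'),
--     (3, 'exposure'),
--     (5, 'fixing'),
--     (11, 'foreign exchange control'),
--     (12, 'gross settlement'),
--     (4, 'holiday'),
--     (1, 'im'),
--     (9, 'imm date'),
--     (8, 'infrastructure'),
--     (1, 'initial margin'),
--     (1, 'insufficient margin'),
--     (0, 'intermediary bank'),
--     (2, 'isda'),
--     (6, 'isda dc'),
--     (6, 'isda determinations committee'),
--     (7, 'kyc'),
--     (2, 'legal documentation'),
--     (2, 'legal entity identifier'),
--     (2, 'legal terms'),
--     (2, 'lei'),
--     (5, 'libor'),
--     (10, 'lifecycle'),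
--     (2, 'mapping'),
--     (1, 'margin'),
--     (1, 'margin call'),
--     (4, 'market closure'),
--     (5, 'market rate'),
--     (2, 'master agreement'),
--     (9, 'maturity'),
--     (6, 'merger'),
--     (7, 'mifid'),
--     (12, 'multilateral netting'),
--     (12, 'net settlement'),
--     (12, 'netting'),
--     (8, 'network'),
--     (2, 'no mapping'),
--     (4, 'non-business day'),
--     (9, 'non-standard'),
--     (0, 'nostro'),
--     (9, 'notional'),
--     (10, 'novation'),
--     (7, 'ofac'),
--     (5, 'off-market'),
--     (11, 'offshore'),
--     (11, 'onshore'),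
--     (8, 'outage'),
--     (0, 'payment routing'),
--     (11, 'pboc'),
--     (1, 'posting requirement'),
--     (5, 'pricing'),
--     (5, 'rate'),
--     (6, 'reference entity'),
--     (5, 'reference rate'),
--     (7, 'regulatory'),
--     (6, 'restructuring'),
--     (11, 'rmb restriction'),
--     (11, 'safe quota'),
--     (7, 'sanctions'),
--     (7, 'screening'),
--     (0, 'settlement'),
--     (0, 'settlement bank'),
--     (4, 'settlement date'),
--     (0, 'settlement instruction'),
--     (12, 'settlement optimization'),
--     (5, 'sofr'),
--     (6, 'spin-off'),
--     (0, 'ssi'),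
--     (6, 'succession'),
--     (8, 'swift'),
--     (8, 'system'),
--     (8, 'system error'),
--     (8, 'technical failure'),
--     (9, 'tenor'),
--     (8, 'timeout'),
--     (10, 'trade confirmation'),
--     (9, 'trade economics'),
--     (9, 'trade structure'),
--     (1, 'variation margin'),
--     (1, 'vm'),
--     (0, 'vostro'),
--     (10, 'workflow'),
-- ]
--
-- # Keywords bucketed by their first character, built once at import.
-- _INDEX = {}
-- for _i, _kw in _PAIRS:
--     _INDEX.setdefault(_kw[0], []).append((_i, _kw))
--
--
-- def categorize_exception(error_msg: str, comment: str = "") -> str: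
--     text = f"{error_msg} {comment}".lower()
--     matched = set()
--     for j, ch in enumerate(text):
--         for i, kw in _INDEX.get(ch, ()):
--             if text.startswith(kw, j):
--                 matched.add(i)
--     cats = [name for i, name in _CATEGORIES if i in matched]
--     return ' | '.join(cats) if cats else "General Exception"
-- ===== Notes on version B (the rewrite author's own statement) =====
-- stated objective: alternative
-- what changed: Replaces A's per-category loop of substring searches over the whole text with a single left-to-right scan over text positions driven by a precomputed first-character keyword index, accumulating matched categories in a set that is then projected onto the fixed category order.
import Mathlib
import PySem

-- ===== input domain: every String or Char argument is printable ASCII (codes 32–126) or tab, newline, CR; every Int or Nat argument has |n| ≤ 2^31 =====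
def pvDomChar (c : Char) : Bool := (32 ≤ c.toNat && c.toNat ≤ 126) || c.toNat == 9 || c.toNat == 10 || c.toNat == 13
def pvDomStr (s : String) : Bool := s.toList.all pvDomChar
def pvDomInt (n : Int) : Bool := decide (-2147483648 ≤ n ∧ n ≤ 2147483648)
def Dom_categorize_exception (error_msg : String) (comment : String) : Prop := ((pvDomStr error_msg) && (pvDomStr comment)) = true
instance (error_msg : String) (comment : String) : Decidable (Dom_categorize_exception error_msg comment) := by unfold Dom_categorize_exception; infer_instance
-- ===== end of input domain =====

-- B replaces A's per-category substring searches by a single scan over text positions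
-- driven by a precomputed first-character keyword index (objective: alternative).

-- ===== PORT A =====
-- A's category -> keywords dict literal (iteration order = insertion order).
def pvTable : List (String × List String) := [
  ("Settlement Instructions Problem", ["ssi", "settlement instruction", "payment routing", "correspondent bank", "intermediary bank", "settlement bank", "nostro", "vostro", "settlement"]),
  ("Collateral and Margin Issue", ["collateral", "margin", "csa", "variation margin", "initial margin", "margin call", "vm", "im", "posting requirement", "insufficient margin"]),
  ("Legal Documentation Gap", ["isda", "lei", "legal entity identifier", "documentation", "master agreement", "confirmation", "legal documentation", "legal terms", "credit support annex", "mapping", "no mapping"]),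
  ("Credit Capacity Constraint", ["credit limit", "credit line", "downgrade", "credit rating", "exposure", "credit capacity", "creditworthiness", "credit check", "credit reject", "credit fail", "credit approved"]),
  ("Holiday Calendar Conflict", ["holiday", "bank holiday", "closed market", "non-business day", "market closure", "calendar", "settlement date"]),
  ("Rate and Pricing Validation", ["libor", "sofr", "off-market", "rate", "fixing", "benchmark", "pricing", "market rate", "reference rate"]),
  ("Reference Entity Credit Event", ["succession", "restructuring", "credit event", "isda determinations committee", "reference entity", "merger", "spin-off", "isda dc"]),
  ("Regulatory Compliance Failure", ["mifid", "aml", "kyc", "ofac", "sanctions", "compliance", "regulatory", "emir", "dodd-frank", "screening"]),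
  ("System and Infrastructure Failure", ["swift", "connectivity", "timeout", "system", "booking system", "outage", "infrastructure", "technical failure", "network", "system error"]),
  ("Trade Structure Non-Standard", ["maturity", "notional", "imm date", "tenor", "effective date", "trade structure", "non-standard", "trade economics"]),
  ("Trade Lifecycle Workflow Issue", ["affirmation", "dtcc", "compression", "bilateral", "novation", "lifecycle", "workflow", "trade confirmation", "consent", "consent rejected"]),
  ("Capital Controls and Restrictions", ["safe quota", "capital control", "cross-border", "foreign exchange control", "pboc", "onshore", "offshore", "rmb restriction"]),
  ("Settlement Netting Optimization", ["netting", "gross settlement", "net settlement", "bilateral netting", "multilateral netting", "settlement optimization"])]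

def categorize_exception (error_msg : String) (comment : String) : String :=
  let combined := PySem.Chars.lower (error_msg.toList ++ ' ' :: comment.toList)
  let categories := pvTable.foldl (fun acc p =>
      if p.2.any (fun kw => PySem.Chars.isIn kw.toList combined) then acc ++ [p.1] else acc) []
  if categories.isEmpty then "General Exception" else PySem.Str.join " | " categories

-- ===== PORT B =====
-- _CATEGORIES: the numbered categories, in display order (literal, as in Source B).
def pvOrder : List (Nat × String) := [
  (0, "Settlement Instructions Problem"),
  (1, "Collateral and Margin Issue"),
  (2, "Legal Documentation Gap"),
  (3, "Credit Capacity Constraint"),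
  (4, "Holiday Calendar Conflict"),
  (5, "Rate and Pricing Validation"),
  (6, "Reference Entity Credit Event"),
  (7, "Regulatory Compliance Failure"),
  (8, "System and Infrastructure Failure"),
  (9, "Trade Structure Non-Standard"),
  (10, "Trade Lifecycle Workflow Issue"),
  (11, "Capital Controls and Restrictions"),
  (12, "Settlement Netting Optimization")]

-- _PAIRS: the flat (category-id, keyword) table, sorted by keyword (literal, as in Source B).
def pvPairsB : List (Nat × String) := [
  (10, "affirmation"),
  (7, "aml"),
  (4, "bank holiday"),
  (5, "benchmark"),
  (10, "bilateral"),
  (12, "bilateral netting"),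
  (8, "booking system"),
  (4, "calendar"),
  (11, "capital control"),
  (4, "closed market"),
  (1, "collateral"),
  (7, "compliance"),
  (10, "compression"),
  (2, "confirmation"),
  (8, "connectivity"),
  (10, "consent"),
  (10, "consent rejected"),
  (0, "correspondent bank"),
  (3, "credit approved"),
  (3, "credit capacity"),
  (3, "credit check"),
  (6, "credit event"),
  (3, "credit fail"),
  (3, "credit limit"),
  (3, "credit line"),
  (3, "credit rating"),
  (3, "credit reject"),
  (2, "credit support annex"),
  (3, "creditworthiness"),
  (11, "cross-border"),
  (1, "csa"),
  (2, "documentation"),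
  (7, "dodd-frank"),
  (3, "downgrade"),
  (10, "dtcc"),
  (9, "effective date"),
  (7, "emir"),
  (3, "exposure"),
  (5, "fixing"),
  (11, "foreign exchange control"),
  (12, "gross settlement"),
  (4, "holiday"),
  (1, "im"),
  (9, "imm date"),
  (8, "infrastructure"),
  (1, "initial margin"),
  (1, "insufficient margin"),
  (0, "intermediary bank"),
  (2, "isda"),
  (6, "isda dc"),
  (6, "isda determinations committee"),
  (7, "kyc"),
  (2, "legal documentation"),
  (2, "legal entity identifier"),
  (2, "legal terms"),
  (2, "lei"),
  (5, "libor"),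
  (10, "lifecycle"),
  (2, "mapping"),
  (1, "margin"),
  (1, "margin call"),
  (4, "market closure"),
  (5, "market rate"),
  (2, "master agreement"),
  (9, "maturity"),
  (6, "merger"),
  (7, "mifid"),
  (12, "multilateral netting"),
  (12, "net settlement"),
  (12, "netting"),
  (8, "network"),
  (2, "no mapping"),
  (4, "non-business day"),
  (9, "non-standard"),
  (0, "nostro"),
  (9, "notional"),
  (10, "novation"),
  (7, "ofac"),
  (5, "off-market"),
  (11, "offshore"),
  (11, "onshore"),
  (8, "outage"),
  (0, "payment routing"),
  (11, "pboc"),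
  (1, "posting requirement"),
  (5, "pricing"),
  (5, "rate"),
  (6, "reference entity"),
  (5, "reference rate"),
  (7, "regulatory"),
  (6, "restructuring"),
  (11, "rmb restriction"),
  (11, "safe quota"),
  (7, "sanctions"),
  (7, "screening"),
  (0, "settlement"),
  (0, "settlement bank"),
  (4, "settlement date"),
  (0, "settlement instruction"),
  (12, "settlement optimization"),
  (5, "sofr"),
  (6, "spin-off"),
  (0, "ssi"),
  (6, "succession"),
  (8, "swift"),
  (8, "system"),
  (8, "system error"),
  (8, "technical failure"),
  (9, "tenor"),
  (8, "timeout"),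
  (10, "trade confirmation"),
  (9, "trade economics"),
  (9, "trade structure"),
  (1, "variation margin"),
  (1, "vm"),
  (0, "vostro"),
  (10, "workflow")]

-- _INDEX: keywords bucketed by first character, built once (setdefault(kw[0], []).append(...)).
-- The match's none branch is Python's kw[0] IndexError, unreachable: every keyword is nonempty.
def pvIndex : PySem.Dict Char (List (Nat × String)) :=
  pvPairsB.foldl (fun d q =>
    match q.2.toList.head? with
    | some c => d.insert c (d.getD c [] ++ [q])
    | none => d) PySem.Dict.empty

def categorize_exception_alt (error_msg : String) (comment : String) : String :=
  let text := PySem.Chars.lower (error_msg.toList ++ ' ' :: comment.toList)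
  let matched : PySem.Set Nat := (PySem.List.enumerate text).foldl (fun s e =>
      (pvIndex.getD e.2 []).foldl (fun s q =>
        if PySem.Chars.startswith (text.drop e.1.toNat) q.2.toList then PySem.Set.add s q.1 else s) s)
      PySem.Set.empty
  let cats := (pvOrder.filter (fun r => PySem.Set.contains matched r.1)).map (fun r => r.2)
  if cats.isEmpty then "General Exception" else PySem.Str.join " | " cats

-- ===== PRECONDITION & SPEC =====
def Spec_categorize_exception (error_msg : String) (comment : String) (out : String) : Prop := out = categorize_exception_alt error_msg comment
instance (error_msg : String) (comment : String) (out : String) : Decidable (Spec_categorize_exception error_msg comment out) := by unfold Spec_categorize_exception; infer_instance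

-- ===== CLAIM (what is proved, stated in full; the proofs are below) =====
def Claim_equal_categorize_exception : Prop := ∀ (error_msg : String) (comment : String), Dom_categorize_exception error_msg comment → Spec_categorize_exception error_msg comment (categorize_exception error_msg comment)

-- ===== LEMMAS AND PROOFS =====

-- Proof-side view of the data: A's table with explicit indices, flattened to (id, keyword) pairs.
def pvPairsSpec : List (Nat × String) := pvTable.zipIdx.flatMap (fun r => r.1.2.map (fun kw => (r.2, kw)))

-- B's sorted flat pair literal is a permutation of the indexed flattening of A's table.
set_option maxRecDepth 1000000 in
lemma pv_pairs_perm : pvPairsB.Perm pvPairsSpec := by decide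

-- B's numbered category list is exactly A's table's names with their indices.
lemma pv_order_eq : pvOrder = pvTable.zipIdx.map (fun r => (r.2, r.1.1)) := by decide

-- Every keyword in the table is nonempty.
lemma pv_kw_ne_nil : ∀ r ∈ pvTable.zipIdx, ∀ kw ∈ r.1.2, kw.toList ≠ [] := by decide

-- The indices of the indexed table are pairwise distinct.
lemma pv_idx_nodup : (pvTable.zipIdx.map Prod.snd).Nodup := by decide

-- The grouping fold: each bucket holds exactly the pairs whose keyword starts with that character, in order.
lemma pv_group (l : List (Nat × String)) (d : PySem.Dict Char (List (Nat × String)))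
    (ch : Char) :
    (l.foldl (fun d q =>
        match q.2.toList.head? with
        | some c => d.insert c (d.getD c [] ++ [q])
        | none => d) d).getD ch []
      = d.getD ch [] ++ l.filter (fun q => q.2.toList.head? == some ch) := by
  induction l generalizing d with
  | nil => simp
  | cons q l ih =>
    rw [List.foldl_cons, ih]
    cases hq : q.2.toList.head? with
    | none => simp [hq]
    | some c =>
      simp only [hq, PySem.Dict.getD_insert, List.filter_cons]
      by_cases hc : ch = c
      · subst hc
        simp
      · have : (some c == some ch) = false := by
          simp
          exact fun h => hc h.symm
        simp [hc, this]

lemma pv_index_getD (ch : Char) :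
    pvIndex.getD ch [] = pvPairsB.filter (fun q => q.2.toList.head? == some ch) := by
  unfold pvIndex
  rw [pv_group]
  simp [PySem.Dict.getD_empty]

-- Membership in the inner fold over one bucket.
lemma pv_mem_inner (text : List Char) (i : Nat) (l : List (Nat × String))
    (s : PySem.Set Nat) (c : Nat) :
    c ∈ l.foldl (fun s q =>
        if PySem.Chars.startswith (text.drop i) q.2.toList then PySem.Set.add s q.1 else s) s ↔
      c ∈ s ∨ ∃ q ∈ l, PySem.Chars.startswith (text.drop i) q.2.toList = true ∧ q.1 = c := by
  induction l generalizing s with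
  | nil => simp
  | cons q l ih =>
    simp only [List.foldl_cons]
    by_cases h : PySem.Chars.startswith (text.drop i) q.2.toList = true
    · rw [if_pos h, ih]
      simp only [PySem.Set.mem_add, List.mem_cons]
      constructor
      · rintro ((hs | rfl) | ⟨r, hr, hrest⟩)
        · exact Or.inl hs
        · exact Or.inr ⟨q, Or.inl rfl, h, rfl⟩
        · exact Or.inr ⟨r, Or.inr hr, hrest⟩
      · rintro (hs | ⟨r, (rfl | hr), hsw, hqc⟩)
        · exact Or.inl (Or.inl hs)
        · exact Or.inl (Or.inr hqc.symm)
        · exact Or.inr ⟨r, hr, hsw, hqc⟩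
    · rw [if_neg h, ih]
      constructor
      · rintro (hs | ⟨r, hr, hrest⟩)
        · exact Or.inl hs
        · exact Or.inr ⟨r, List.mem_cons_of_mem _ hr, hrest⟩
      · rintro (hs | ⟨r, hr, hsw, hqc⟩)
        · exact Or.inl hs
        · rcases List.mem_cons.mp hr with rfl | hr
          · exact absurd hsw h
          · exact Or.inr ⟨r, hr, hsw, hqc⟩

-- Membership in the outer fold over the enumerated positions.
lemma pv_mem_outer (text : List Char) (es : List (Int × Char))
    (s : PySem.Set Nat) (c : Nat) :
    c ∈ es.foldl (fun s e =>
        (pvIndex.getD e.2 []).foldl (fun s q =>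
          if PySem.Chars.startswith (text.drop e.1.toNat) q.2.toList then PySem.Set.add s q.1 else s) s) s ↔
      c ∈ s ∨ ∃ e ∈ es, ∃ q ∈ pvIndex.getD e.2 [],
        PySem.Chars.startswith (text.drop e.1.toNat) q.2.toList = true ∧ q.1 = c := by
  induction es generalizing s with
  | nil => simp
  | cons e es ih =>
    rw [List.foldl_cons, ih, pv_mem_inner]
    constructor
    · rintro ((h | ⟨q, hq, hsw, hqc⟩) | ⟨j, hj, hrest⟩)
      · exact Or.inl h
      · exact Or.inr ⟨e, List.mem_cons_self, ⟨q, hq, hsw, hqc⟩⟩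
      · exact Or.inr ⟨j, List.mem_cons_of_mem _ hj, hrest⟩
    · rintro (h | ⟨j, hj, hrest⟩)
      · exact Or.inl (Or.inl h)
      · rcases List.mem_cons.mp hj with rfl | hj
        · exact Or.inl (Or.inr hrest)
        · exact Or.inr ⟨j, hj, hrest⟩

-- The per-category equivalence: the position scan finds index r.2 iff
-- some keyword of the r.2-th category is a substring of the text.
lemma pv_key (text : List Char) (r : (String × List String) × Nat) (hr : r ∈ pvTable.zipIdx) :
    (∃ e ∈ PySem.List.enumerate text, ∃ q ∈ pvIndex.getD e.2 [],
        PySem.Chars.startswith (text.drop e.1.toNat) q.2.toList = true ∧ q.1 = r.2) ↔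
      (r.1.2.any (fun kw => PySem.Chars.isIn kw.toList text)) = true := by
  constructor
  · rintro ⟨e, _, q, hq, hsw, hqc⟩
    rw [pv_index_getD] at hq
    have hq' : q ∈ pvPairsB := List.mem_of_mem_filter hq
    rw [pv_pairs_perm.mem_iff] at hq'
    rcases List.mem_flatMap.mp hq' with ⟨r', hr', hqr⟩
    rcases List.mem_map.mp hqr with ⟨kw, hkw, rfl⟩
    have hidx : r'.2 = r.2 := hqc
    have : r' = r := List.inj_on_of_nodup_map pv_idx_nodup hr' hr hidx
    rw [this] at hkw
    refine List.any_eq_true.mpr ⟨kw, hkw, ?_⟩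
    exact (PySem.Chars.exists_prefix_drop_iff_isIn kw.toList text).mp
      ⟨e.1.toNat, (PySem.Chars.startswith_iff _ _).mp hsw⟩
  · intro h
    rcases List.any_eq_true.mp h with ⟨kw, hkw, hin⟩
    rcases (PySem.Chars.exists_prefix_drop_iff_isIn kw.toList text).mpr hin with ⟨j, hj⟩
    have hne : kw.toList ≠ [] := pv_kw_ne_nil r hr kw hkw
    have hjlt : j < text.length := by
      by_contra hge
      rw [List.drop_eq_nil_of_le (Nat.le_of_not_lt hge)] at hj
      exact hne (List.prefix_nil.mp hj)
    rcases hkw' : kw.toList with _ | ⟨c, rest⟩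
    · exact absurd hkw' hne
    have hdrop : (text.drop j).head? = some c := by
      rw [hkw'] at hj
      rcases hj with ⟨t, ht⟩
      rw [← ht]
      rfl
    have hc : text[j] = c := by
      have := List.head?_drop (l := text) (i := j)
      rw [hdrop] at this
      have h2' : text[j]? = some text[j] := List.getElem?_eq_getElem hjlt
      rw [h2'] at this
      exact (Option.some.inj this).symm
    refine ⟨((j : Int), text[j]), ?_, (r.2, kw), ?_, ?_, rfl⟩
    · exact (PySem.List.mem_enumerate_iff text 0 _).mpr ⟨j, hjlt, by simp⟩
    · rw [pv_index_getD]
      refine List.mem_filter.mpr ⟨?_, ?_⟩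
      · rw [pv_pairs_perm.mem_iff]
        exact List.mem_flatMap.mpr ⟨r, hr, List.mem_map.mpr ⟨kw, hkw, rfl⟩⟩
      · simp only [hkw', List.head?_cons, hc, beq_iff_eq]
    · simp only [Int.toNat_natCast]
      exact (PySem.Chars.startswith_iff _ _).mpr hj

-- Filtering the indexed table on a property of the entry and projecting the name
-- is filtering the table itself.
lemma pv_zipIdx_filter_map (g : String × List String → Bool) :
    ∀ (l : List (String × List String)) (n : Nat),
    (((l.zipIdx n).filter (fun r => g r.1)).map (fun r => r.1.1))
      = (l.filter g).map Prod.fst := by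
  intro l
  induction l with
  | nil => intro n; simp
  | cons p l ih =>
    intro n
    rw [List.zipIdx_cons]
    simp only [List.filter_cons]
    by_cases hg : g p = true
    · simp [hg, ih]
    · simp [hg, ih]

-- The two category lists coincide.
lemma pv_cats_eq (text : List Char) :
    (pvOrder.filter (fun r => PySem.Set.contains
        ((PySem.List.enumerate text).foldl (fun s e =>
          (pvIndex.getD e.2 []).foldl (fun s q =>
            if PySem.Chars.startswith (text.drop e.1.toNat) q.2.toList then PySem.Set.add s q.1 else s) s)
          PySem.Set.empty) r.1)).map (fun r => r.2)
      = pvTable.foldl (fun acc p =>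
          if p.2.any (fun kw => PySem.Chars.isIn kw.toList text) then acc ++ [p.1] else acc) [] := by
  rw [PySem.List.foldl_append_if (fun p => p.2.any (fun kw => PySem.Chars.isIn kw.toList text))
      Prod.fst pvTable []]
  simp only [List.nil_append]
  rw [pv_order_eq, List.filter_map, List.map_map]
  have hcongr : (pvTable.zipIdx.filter
        ((fun r => PySem.Set.contains
          ((PySem.List.enumerate text).foldl (fun s e =>
            (pvIndex.getD e.2 []).foldl (fun s q =>
              if PySem.Chars.startswith (text.drop e.1.toNat) q.2.toList then PySem.Set.add s q.1 else s) s)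
            PySem.Set.empty) r.1) ∘ (fun r => (r.2, r.1.1))))
      = pvTable.zipIdx.filter (fun r => r.1.2.any (fun kw => PySem.Chars.isIn kw.toList text)) := by
    apply List.filter_congr
    intro r hr
    simp only [Function.comp_apply]
    rw [Bool.eq_iff_iff, PySem.Set.contains_iff, pv_mem_outer, ← pv_key text r hr]
    constructor
    · rintro (h | h)
      · simp [PySem.Set.empty] at h
      · exact h
    · exact Or.inr
  rw [hcongr]
  have : ((fun r => r.2) ∘ (fun (r : (String × List String) × Nat) => (r.2, r.1.1)))
      = (fun r => r.1.1) := rfl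
  rw [this]
  exact pv_zipIdx_filter_map (fun p => p.2.any (fun kw => PySem.Chars.isIn kw.toList text)) pvTable 0

-- ===== VERDICT (by name: the statement is the Claim_ definition above) =====
theorem categorize_exception_spec : Claim_equal_categorize_exception := by
  intro error_msg comment _
  unfold Spec_categorize_exception categorize_exception categorize_exception_alt
  simp only [pv_cats_eq]
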